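-- pv_equiv track=rewrite | github.com/dagoaty/AdventofCode2021 | day4/day4.py | getWinningCard
-- ===== SOURCE A (Python) =====
-- from typing import List, Tuple, Set
--
-- def getNumPos(num: int, callLine: List[int]) -> int:
--     pos: int = 0
--     for call in callLine:
--         if call == num:
--             return pos
--         pos += 1
--     return pos
--
-- def getCardWinningPos(card: List[List[int]], callLine: List[int]) -> int:
--     cardWinPos: int = len(callLine)
--     for line in card:
--         lineWinPos: int = 0
--         for num in line:
--             numPos = getNumPos(num, callLine)
--             if numPos > lineWinPos:
--                 lineWinPos = numPos
--         if lineWinPos < cardWinPos: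
--             cardWinPos = lineWinPos
--     return cardWinPos
--
-- def getWinningCard(cards: List[List[List[int]]], callLine: List[int]) -> Tuple[int, int]:
--     winCard: int = len(cards)
--     cardNum: int = 0
--     winPos: int = len(callLine)
--     for card in cards:
--         cardWinPos = getCardWinningPos(card, callLine)
--         if cardWinPos < winPos:
--             winCard = cardNum
--             winPos = cardWinPos
--         cardNum += 1
--     return winCard, winPos
-- ===== SOURCE B (Python) =====
-- def getWinningCard(cards, callLine):
--     called = set()
--     for i, call in enumerate(callLine):
--         called.add(call)
--         for idx, card in enumerate(cards):
--             if any(all(n in called for n in row) for row in card):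
--                 return idx, i
--     return len(cards), len(callLine)
-- ===== Notes on version B (the rewrite author's own statement) =====
-- stated objective: alternative
-- what changed: Replaces A's per-card computation of min-over-rows of max first-call-position with a forward simulation of the draw: maintain the set of called numbers and after each call scan cards in order for a fully-called row, returning the first winner and the call index.
import Mathlib
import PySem

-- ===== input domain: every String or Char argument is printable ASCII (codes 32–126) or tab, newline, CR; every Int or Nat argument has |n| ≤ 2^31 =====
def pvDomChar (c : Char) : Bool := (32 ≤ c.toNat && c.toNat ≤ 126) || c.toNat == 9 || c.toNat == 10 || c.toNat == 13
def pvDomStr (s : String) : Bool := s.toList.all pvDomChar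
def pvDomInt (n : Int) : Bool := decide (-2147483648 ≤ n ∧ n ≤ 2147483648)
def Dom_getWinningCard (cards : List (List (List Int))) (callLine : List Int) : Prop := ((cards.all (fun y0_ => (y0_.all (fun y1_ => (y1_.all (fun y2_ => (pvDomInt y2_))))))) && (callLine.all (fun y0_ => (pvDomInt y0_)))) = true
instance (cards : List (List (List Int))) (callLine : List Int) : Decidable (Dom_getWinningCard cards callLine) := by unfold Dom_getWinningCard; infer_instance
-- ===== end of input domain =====

-- B replaces A's per-card min-of-max-call-position computation by a forward
-- simulation of the draw (alternative decomposition, similar cost).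

-- ===== PORT A =====
def getNumPosGo (num : Int) : List Int → Int → Int
  | [], pos => pos
  | call :: rest, pos => if call = num then pos else getNumPosGo num rest (pos + 1)

def getNumPos (num : Int) (callLine : List Int) : Int := getNumPosGo num callLine 0

def lineLoop (callLine : List Int) : List Int → Int → Int
  | [], lineWinPos => lineWinPos
  | num :: rest, lineWinPos =>
      let numPos := getNumPos num callLine
      lineLoop callLine rest (if numPos > lineWinPos then numPos else lineWinPos)

def cardLoop (callLine : List Int) : List (List Int) → Int → Int
  | [], cardWinPos => cardWinPos
  | line :: rest, cardWinPos =>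
      let lineWinPos := lineLoop callLine line 0
      cardLoop callLine rest (if lineWinPos < cardWinPos then lineWinPos else cardWinPos)

def getCardWinningPos (card : List (List Int)) (callLine : List Int) : Int :=
  cardLoop callLine card (callLine.length : Int)

def mainLoop (callLine : List Int) : List (List (List Int)) → Int → Int → Int → Int × Int
  | [], winCard, _cardNum, winPos => (winCard, winPos)
  | card :: rest, winCard, cardNum, winPos =>
      let cardWinPos := getCardWinningPos card callLine
      if cardWinPos < winPos then mainLoop callLine rest cardNum (cardNum + 1) cardWinPos
      else mainLoop callLine rest winCard (cardNum + 1) winPos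

def getWinningCard (cards : List (List (List Int))) (callLine : List Int) : Int × Int :=
  mainLoop callLine cards (cards.length : Int) 0 (callLine.length : Int)

-- ===== PORT B =====
def rowDone (called : PySem.Set Int) (row : List Int) : Bool :=
  row.all (fun n => PySem.Set.contains called n)

def cardWinsB (called : PySem.Set Int) (card : List (List Int)) : Bool :=
  card.any (fun row => rowDone called row)

def findWin (called : PySem.Set Int) : List (List (List Int)) → Int → Option Int
  | [], _ => none
  | card :: rest, idx =>
      if cardWinsB called card then some idx else findWin called rest (idx + 1)

def simLoop (cards : List (List (List Int))) : List Int → Int → PySem.Set Int → Option (Int × Int)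
  | [], _, _ => none
  | call :: rest, i, called =>
      let called' := PySem.Set.add called call
      match findWin called' cards 0 with
      | some idx => some (idx, i)
      | none => simLoop cards rest (i + 1) called'

def getWinningCard_alt (cards : List (List (List Int))) (callLine : List Int) : Int × Int :=
  match simLoop cards callLine 0 PySem.Set.empty with
  | some r => r
  | none => ((cards.length : Int), (callLine.length : Int))

-- ===== PRECONDITION & SPEC =====
def Spec_getWinningCard (cards : List (List (List Int))) (callLine : List Int) (out : Int × Int) : Prop := out = getWinningCard_alt cards callLine
instance (cards : List (List (List Int))) (callLine : List Int) (out : Int × Int) : Decidable (Spec_getWinningCard cards callLine out) := by unfold Spec_getWinningCard; infer_instance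

-- ===== CLAIM (what is proved, stated in full; the proofs are below) =====
def Claim_equal_getWinningCard : Prop := ∀ (cards : List (List (List Int))) (callLine : List Int), Dom_getWinningCard cards callLine → Spec_getWinningCard cards callLine (getWinningCard cards callLine)

-- ===== LEMMAS AND PROOFS =====

-- Nat-valued specification of A's quantities.
def fIdx (num : Int) : List Int → Nat
  | [] => 0
  | c :: rest => if c = num then 0 else fIdx num rest + 1

def lineN (callLine : List Int) : List Int → Nat → Nat
  | [], a => a
  | n :: rest, a => lineN callLine rest (max a (fIdx n callLine))

def cardN (callLine : List Int) : List (List Int) → Nat → Nat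
  | [], a => a
  | l :: rest, a => cardN callLine rest (min a (lineN callLine l 0))

def cardPos (card : List (List Int)) (callLine : List Int) : Nat :=
  cardN callLine card callLine.length

def best (callLine : List Int) : List (List (List Int)) → Nat → Nat → Nat → Nat × Nat
  | [], wc, _, wp => (wc, wp)
  | c :: rest, wc, n, wp =>
      if cardPos c callLine < wp then best callLine rest n (n + 1) (cardPos c callLine)
      else best callLine rest wc (n + 1) wp

-- A-side: the Int loops compute the Nat specification.
theorem getNumPosGo_eq (num : Int) (l : List Int) : ∀ p : Int, getNumPosGo num l p = p + (fIdx num l : Nat) := by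
  induction l with
  | nil => intro p; simp [getNumPosGo, fIdx]
  | cons c rest ih =>
      intro p
      simp only [getNumPosGo, fIdx]
      by_cases h : c = num
      · simp [h]
      · simp only [if_neg h]; rw [ih]; push_cast; ring

theorem lineLoop_eq (cl : List Int) (l : List Int) : ∀ a : Nat, lineLoop cl l (a : Int) = (lineN cl l a : Nat) := by
  induction l with
  | nil => intro a; simp [lineLoop, lineN]
  | cons n rest ih =>
      intro a
      simp only [lineLoop, lineN, getNumPos, getNumPosGo_eq, zero_add]
      by_cases h : (fIdx n cl : Int) > (a : Int)
      · rw [if_pos h, show max a (fIdx n cl) = fIdx n cl by omega, ih]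
      · rw [if_neg h, show max a (fIdx n cl) = a by omega, ih]

theorem cardLoop_eq (cl : List Int) (card : List (List Int)) : ∀ a : Nat, cardLoop cl card (a : Int) = (cardN cl card a : Nat) := by
  induction card with
  | nil => intro a; simp [cardLoop, cardN]
  | cons l rest ih =>
      intro a
      simp only [cardLoop, cardN]
      rw [show ((0 : Int) = ((0 : Nat) : Int)) from rfl, lineLoop_eq]
      by_cases h : (lineN cl l 0 : Int) < (a : Int)
      · rw [if_pos h, show min a (lineN cl l 0) = lineN cl l 0 by omega, ih]
      · rw [if_neg h, show min a (lineN cl l 0) = a by omega, ih]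

theorem getCardWinningPos_eq (card : List (List Int)) (cl : List Int) :
    getCardWinningPos card cl = (cardPos card cl : Nat) := by
  simp only [getCardWinningPos, cardPos]
  exact_mod_cast cardLoop_eq cl card cl.length

theorem mainLoop_eq (cl : List Int) (cs : List (List (List Int))) :
    ∀ wc n wp : Nat, mainLoop cl cs (wc : Int) (n : Int) (wp : Int) =
      (((best cl cs wc n wp).1 : Int), ((best cl cs wc n wp).2 : Int)) := by
  induction cs with
  | nil => intro wc n wp; simp [mainLoop, best]
  | cons c rest ih =>
      intro wc n wp
      simp only [mainLoop, best, getCardWinningPos_eq]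
      by_cases h : cardPos c cl < wp
      · rw [if_pos (by exact_mod_cast h), if_pos h]
        rw [show ((n : Int) + 1 = ((n + 1 : Nat) : Int)) by push_cast; ring, ih]
      · rw [if_neg (by exact_mod_cast h), if_neg h]
        rw [show ((n : Int) + 1 = ((n + 1 : Nat) : Int)) by push_cast; ring, ih]

-- Characterisations of the Nat specification.
theorem lineN_le_iff (cl l : List Int) : ∀ a i : Nat, lineN cl l a ≤ i ↔ a ≤ i ∧ ∀ n ∈ l, fIdx n cl ≤ i := by
  induction l with
  | nil => intro a i; simp [lineN]
  | cons n rest ih =>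
      intro a i
      simp only [lineN, ih, List.mem_cons]
      constructor
      · rintro ⟨h1, h2⟩
        refine ⟨by omega, ?_⟩
        rintro m (rfl | hm)
        · omega
        · exact h2 m hm
      · rintro ⟨h1, h2⟩
        exact ⟨by have := h2 n (Or.inl rfl); omega, fun m hm => h2 m (Or.inr hm)⟩

theorem cardN_le_iff (cl : List Int) (card : List (List Int)) :
    ∀ a i : Nat, cardN cl card a ≤ i ↔ a ≤ i ∨ ∃ l ∈ card, lineN cl l 0 ≤ i := by
  induction card with
  | nil => intro a i; simp [cardN]
  | cons l rest ih =>
      intro a i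
      simp only [cardN, ih, List.mem_cons]
      constructor
      · rintro (h | ⟨m, hm, h⟩)
        · rcases min_le_iff.mp h with h' | h'
          · exact Or.inl h'
          · exact Or.inr ⟨l, Or.inl rfl, h'⟩
        · exact Or.inr ⟨m, Or.inr hm, h⟩
      · rintro (h | ⟨m, (rfl | hm), h⟩)
        · exact Or.inl (le_trans (Nat.min_le_left _ _) h)
        · exact Or.inl (le_trans (Nat.min_le_right _ _) h)
        · exact Or.inr ⟨m, hm, h⟩

theorem cardN_le_init (cl : List Int) (card : List (List Int)) : ∀ a : Nat, cardN cl card a ≤ a := by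
  induction card with
  | nil => intro a; simp [cardN]
  | cons l rest ih =>
      intro a
      exact le_trans (ih _) (Nat.min_le_left _ _)

-- First-occurrence index against a prefix.
theorem mem_prefix_iff_fIdx_lt (n : Int) (P Q : List Int) : n ∈ P ↔ fIdx n (P ++ Q) < P.length := by
  induction P with
  | nil => simp
  | cons c rest ih =>
      simp only [List.cons_append, fIdx, List.mem_cons, List.length_cons]
      by_cases h : c = n
      · simp [h]
      · have hne : ¬ n = c := fun hh => h hh.symm
        simp only [if_neg h, hne, false_or]
        rw [ih]
        omega

-- B-side: a card wins against the called prefix iff its cardPos is reached.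
theorem cardWinsB_iff (card : List (List Int)) (s : PySem.Set Int) (P Q : List Int) (i : Nat)
    (hs : ∀ x : Int, x ∈ s ↔ x ∈ P) (hlen : P.length = i + 1) (hi : i < (P ++ Q).length) :
    cardWinsB s card = true ↔ cardPos card (P ++ Q) ≤ i := by
  simp only [cardWinsB, List.any_eq_true, rowDone, List.all_eq_true, cardPos,
    cardN_le_iff, lineN_le_iff]
  constructor
  · rintro ⟨row, hrow, hall⟩
    refine Or.inr ⟨row, hrow, Nat.zero_le _, fun n hn => ?_⟩
    have := (mem_prefix_iff_fIdx_lt n P Q).mp ((hs n).mp ((PySem.Set.contains_iff _ _).mp (hall n hn)))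
    omega
  · rintro (h | ⟨row, hrow, _, hall⟩)
    · omega
    · refine ⟨row, hrow, fun n hn => ?_⟩
      exact (PySem.Set.contains_iff _ _).mpr ((hs n).mpr
        ((mem_prefix_iff_fIdx_lt n P Q).mpr (by have := hall n hn; omega)))

-- findWin finds the first winning card.
theorem findWin_none (s : PySem.Set Int) (cs : List (List (List Int))) :
    ∀ n : Int, findWin s cs n = none → ∀ c ∈ cs, cardWinsB s c = false := by
  induction cs with
  | nil => intro n _ c hc; cases hc
  | cons c rest ih =>
      intro n h d hd
      simp only [findWin] at h
      by_cases hw : cardWinsB s c = true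
      · rw [if_pos hw] at h; cases h
      · rw [if_neg hw] at h
        rcases List.mem_cons.mp hd with rfl | hd'
        · exact Bool.eq_false_iff.mpr hw
        · exact ih _ h d hd'

theorem findWin_some (s : PySem.Set Int) (cs : List (List (List Int))) :
    ∀ (n : Int) (v : Int), findWin s cs n = some v →
      ∃ p1 c p2, cs = p1 ++ c :: p2 ∧ v = n + (p1.length : Int) ∧
        (∀ x ∈ p1, cardWinsB s x = false) ∧ cardWinsB s c = true := by
  induction cs with
  | nil => intro n v h; cases h
  | cons c rest ih =>
      intro n v h
      simp only [findWin] at h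
      by_cases hw : cardWinsB s c = true
      · rw [if_pos hw] at h
        exact ⟨[], c, rest, rfl, by simpa using h.symm, by simp, hw⟩
      · rw [if_neg hw] at h
        obtain ⟨p1, d, p2, hcs, hv, hp1, hd⟩ := ih (n + 1) v h
        refine ⟨c :: p1, d, p2, by simp [hcs], ?_, ?_, hd⟩
        · simp only [List.length_cons]; push_cast; omega
        · intro x hx
          rcases List.mem_cons.mp hx with rfl | hx'
          · exact Bool.eq_false_iff.mpr hw
          · exact hp1 x hx'

-- best: no card improves ⇒ state unchanged.
theorem best_no_improve (cl : List Int) (cs : List (List (List Int))) :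
    ∀ wc n wp : Nat, (∀ c ∈ cs, ¬ cardPos c cl < wp) → best cl cs wc n wp = (wc, wp) := by
  induction cs with
  | nil => intro wc n wp _; rfl
  | cons c rest ih =>
      intro wc n wp h
      simp only [best, if_neg (h c (List.mem_cons_self ..))]
      exact ih _ _ _ (fun d hd => h d (List.mem_cons_of_mem _ hd))

-- best: the first card reaching the global minimum p is selected.
theorem best_first_min (cl : List Int) (p : Nat) (c : List (List Int)) (p2 : List (List (List Int)))
    (hc : cardPos c cl = p) (hp2 : ∀ x ∈ p2, p ≤ cardPos x cl) :
    ∀ (p1 : List (List (List Int))) (wc n wp : Nat), p < wp → (∀ x ∈ p1, p < cardPos x cl) →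
      best cl (p1 ++ c :: p2) wc n wp = (n + p1.length, p) := by
  intro p1
  induction p1 with
  | nil =>
      intro wc n wp hwp _
      simp only [List.nil_append, best, hc, if_pos hwp]
      rw [best_no_improve cl p2 n (n + 1) p (fun d hd => by have := hp2 d hd; omega)]
      simp
  | cons x rest ih =>
      intro wc n wp hwp hpre
      have hx : p < cardPos x cl := hpre x (List.mem_cons_self ..)
      simp only [List.cons_append, best]
      by_cases h : cardPos x cl < wp
      · rw [if_pos h, ih n (n + 1) _ (by omega) (fun y hy => hpre y (List.mem_cons_of_mem _ hy))]
        simp only [List.length_cons]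
        congr 1
        omega
      · rw [if_neg h, ih wc (n + 1) wp hwp (fun y hy => hpre y (List.mem_cons_of_mem _ hy))]
        simp only [List.length_cons]
        congr 1
        omega

-- The simulation computes best.
theorem simLoop_eq (cards : List (List (List Int))) (cl : List Int) :
    ∀ (rest P : List Int) (s : PySem.Set Int), cl = P ++ rest →
      (∀ x : Int, x ∈ s ↔ x ∈ P) →
      (∀ c ∈ cards, P.length ≤ cardPos c cl) →
      (match simLoop cards rest (P.length : Int) s with
        | some r => r
        | none => ((cards.length : Int), (cl.length : Int))) =
      (((best cl cards cards.length 0 cl.length).1 : Int),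
       ((best cl cards cards.length 0 cl.length).2 : Int)) := by
  intro rest
  induction rest with
  | nil =>
      intro P s hcl _ hinv
      subst hcl
      rw [best_no_improve _ _ _ _ _ (fun c hc => by
        have h1 := hinv c hc
        have h2 := cardN_le_init (P ++ []) c (P ++ []).length
        simp only [List.append_nil] at *
        simp only [cardPos] at *
        omega)]
      simp [simLoop]
  | cons call rest' ih =>
      intro P s hcl hs hinv
      have hilt : P.length < cl.length := by rw [hcl]; simp
      have hs' : ∀ x : Int, x ∈ PySem.Set.add s call ↔ x ∈ P ++ [call] := by
        intro x
        rw [PySem.Set.mem_add, hs x]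
        simp
      have hclPQ : cl = (P ++ [call]) ++ rest' := by rw [hcl]; simp
      have hlen : (P ++ [call]).length = P.length + 1 := by simp
      have hiw : P.length < ((P ++ [call]) ++ rest').length := by simp
      cases hfw : findWin (PySem.Set.add s call) cards 0 with
      | some idx =>
          obtain ⟨p1, c, p2, hcs, hv, hp1, hcw⟩ := findWin_some _ _ _ _ hfw
          have hcpos : cardPos c cl = P.length := by
            have hle : cardPos c ((P ++ [call]) ++ rest') ≤ P.length := by
              rw [← cardWinsB_iff c (PySem.Set.add s call) (P ++ [call]) rest' P.length hs' hlen hiw]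
              exact hcw
            have hge : P.length ≤ cardPos c cl := hinv c (by rw [hcs]; simp)
            rw [← hclPQ] at hle
            omega
          have hp1' : ∀ x ∈ p1, P.length < cardPos x cl := by
            intro x hx
            have hge : P.length ≤ cardPos x cl := hinv x (by rw [hcs]; simp [hx])
            have hne : ¬ cardPos x ((P ++ [call]) ++ rest') ≤ P.length := by
              rw [← cardWinsB_iff x (PySem.Set.add s call) (P ++ [call]) rest' P.length hs' hlen hiw]
              simp [hp1 x hx]
            rw [← hclPQ] at hne
            omega
          have hp2' : ∀ x ∈ p2, P.length ≤ cardPos x cl :=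
            fun x hx => hinv x (by rw [hcs]; simp [hx])
          have hbest := best_first_min cl P.length c p2 hcpos hp2' p1 cards.length 0 cl.length hilt hp1'
          rw [← hcs] at hbest
          simp only [simLoop, hfw]
          rw [hbest, hv]
          simp
      | none =>
          have hall := findWin_none _ _ _ hfw
          have hinv' : ∀ c ∈ cards, (P ++ [call]).length ≤ cardPos c cl := by
            intro c hc
            have hne : ¬ cardPos c ((P ++ [call]) ++ rest') ≤ P.length := by
              rw [← cardWinsB_iff c (PySem.Set.add s call) (P ++ [call]) rest' P.length hs' hlen hiw]
              simp [hall c hc]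
            rw [← hclPQ] at hne
            rw [hlen]
            omega
          have hstep := ih (P ++ [call]) (PySem.Set.add s call) hclPQ hs' hinv'
          simp only [simLoop, hfw]
          rw [show ((P.length : Int) + 1 = ((P ++ [call]).length : Int)) by rw [hlen]; push_cast; ring]
          exact hstep

-- ===== VERDICT (by name: the statement is the Claim_ definition above) =====
theorem getWinningCard_spec : Claim_equal_getWinningCard := by
  intro cards callLine _
  show getWinningCard cards callLine = getWinningCard_alt cards callLine
  have hsim := simLoop_eq cards callLine callLine [] PySem.Set.empty (by simp)
      (by intro x; simp [PySem.Set.empty]) (by intro c _; simp)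
  simp only [List.length_nil, Nat.cast_zero] at hsim
  have hA := mainLoop_eq callLine cards cards.length 0 callLine.length
  rw [Nat.cast_zero] at hA
  rw [getWinningCard, getWinningCard_alt, hA]
  exact hsim.symm
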